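-- pv_equiv track=rewrite | github.com/donRumata03/Image-manging | Raspredelyator.py | get_smt_by_num
-- ===== SOURCE A (Python) =====
-- def get_smt_by_num(smt, num_pers):
--     person = ""
--     n_pers = 0
--     for i in smt.keys():
--         if n_pers == num_pers:
--             person = i
--             break
--         n_pers += 1
--     return person
-- ===== SOURCE B (Python) =====
-- def get_smt_by_num(smt, num_pers):
--     keys = list(smt)
--     if 0 <= num_pers < len(keys):
--         return keys[num_pers]
--     return ""
-- ===== Notes on version B (the rewrite author's own statement) =====
-- stated objective: simpler
-- what changed: Replaces the count-until-match loop over keys with materializing the key list once and returning keys[num_pers] under an explicit bounds check (empty string otherwise).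
import Mathlib
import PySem

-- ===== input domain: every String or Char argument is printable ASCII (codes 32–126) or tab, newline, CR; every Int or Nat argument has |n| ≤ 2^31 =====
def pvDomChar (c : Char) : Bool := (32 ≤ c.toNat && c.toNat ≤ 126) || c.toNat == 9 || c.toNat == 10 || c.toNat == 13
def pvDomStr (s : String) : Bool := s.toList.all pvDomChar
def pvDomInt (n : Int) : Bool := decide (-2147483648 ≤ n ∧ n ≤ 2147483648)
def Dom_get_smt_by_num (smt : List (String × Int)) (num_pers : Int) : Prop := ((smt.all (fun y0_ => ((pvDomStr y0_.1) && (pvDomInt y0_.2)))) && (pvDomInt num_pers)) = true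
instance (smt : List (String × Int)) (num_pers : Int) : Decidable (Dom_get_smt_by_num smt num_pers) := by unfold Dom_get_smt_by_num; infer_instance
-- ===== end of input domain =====

-- ===== PORT A =====
-- loop over keys with counter n_pers; break returns the key, else person stays ""
def getA_loop : List (String × Int) → Int → Int → String
  | [], _, _ => ""
  | (k, _) :: rest, num, n => if n == num then k else getA_loop rest num (n + 1)

def get_smt_by_num (smt : List (String × Int)) (num_pers : Int) : String :=
  getA_loop smt num_pers 0

-- ===== PORT B =====
-- B: materialize the key list once, positional index under an explicit bounds check
def get_smt_by_num_alt (smt : List (String × Int)) (num_pers : Int) : String :=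
  let keys := smt.map Prod.fst
  if 0 ≤ num_pers ∧ num_pers < keys.length then keys.getD num_pers.toNat "" else ""

-- ===== PRECONDITION & SPEC =====
def Spec_get_smt_by_num (smt : List (String × Int)) (num_pers : Int) (out : String) : Prop := out = get_smt_by_num_alt smt num_pers
instance (smt : List (String × Int)) (num_pers : Int) (out : String) : Decidable (Spec_get_smt_by_num smt num_pers out) := by unfold Spec_get_smt_by_num; infer_instance

-- ===== CLAIM (what is proved, stated in full; the proofs are below) =====
def Claim_equal_get_smt_by_num : Prop := ∀ (smt : List (String × Int)) (num_pers : Int), Dom_get_smt_by_num smt num_pers → Spec_get_smt_by_num smt num_pers (get_smt_by_num smt num_pers)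

-- ===== LEMMAS AND PROOFS =====

lemma getA_loop_shift (l : List (String × Int)) (m c : Int) :
    getA_loop l m (c + 1) = getA_loop l (m - 1) c := by
  induction l generalizing c with
  | nil => simp [getA_loop]
  | cons q t iht =>
    obtain ⟨k', v'⟩ := q
    simp only [getA_loop]
    have he : (c + 1 == m) = (c == m - 1) := by
      by_cases h : c + 1 = m <;> simp_all <;> omega
    rw [he]
    by_cases h : (c == m - 1) = true
    · simp [h]
    · simp only [eq_false_of_ne_true h, Bool.false_eq_true, if_false]
      exact iht (c + 1)

lemma getA_loop_eq (smt : List (String × Int)) (num : Int) :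
    getA_loop smt num 0 =
      (if 0 ≤ num ∧ num < (smt.map Prod.fst).length
        then (smt.map Prod.fst).getD num.toNat "" else "") := by
  induction smt generalizing num with
  | nil =>
    simp only [getA_loop, List.map_nil, List.length_nil]
    rw [if_neg]; omega
  | cons p rest ih =>
    obtain ⟨k, v⟩ := p
    simp only [getA_loop]
    by_cases h0 : num = 0
    · subst h0
      have hc : (0:Int) ≤ 0 ∧ (0:Int) < ((((k,v)::rest).map Prod.fst).length : Int) := by
        refine ⟨le_refl _, ?_⟩
        simp only [List.map_cons, List.length_cons]
        push_cast; omega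
      rw [if_pos (by decide), if_pos hc]
      rfl
    · have hbeq : ((0 : Int) == num) = false := by rw [beq_eq_false_iff_ne]; exact fun h => h0 h.symm
      rw [hbeq]
      simp only [Bool.false_eq_true, if_false]
      rw [show (0 : Int) + 1 = 0 + 1 from rfl, getA_loop_shift rest num 0, ih (num - 1)]
      by_cases hr : 0 ≤ num - 1 ∧ num - 1 < ((rest.map Prod.fst).length : Int)
      · rw [if_pos hr, if_pos (by simp only [List.map_cons, List.length_cons, List.length_map] at hr ⊢; push_cast at hr ⊢; omega)]
        have hnat : num.toNat = (num - 1).toNat + 1 := by omega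
        rw [hnat]
        simp only [List.map_cons, List.getD_cons_succ]
      · rw [if_neg hr, if_neg ?_]
        simp only [List.map_cons, List.length_cons, List.length_map, not_and, not_lt] at hr ⊢
        intro h1
        have := hr (by omega)
        push_cast
        omega

theorem get_smt_by_num_spec : Claim_equal_get_smt_by_num := by
  intro smt num _
  unfold Spec_get_smt_by_num get_smt_by_num get_smt_by_num_alt
  simpa using getA_loop_eq smt num
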